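-- pv_equiv track=rewrite | github.com/pypi-data/pypi-mirror-383 | packages/por-que/por_que-0.1.0-py3-none-any.whl/por_que/file_metadata.py | _process_repeated_struct
-- ===== SOURCE A (Python) =====
-- from typing import Annotated, Any, Literal, cast
--
-- def _process_repeated_struct(children_data: dict[str, Any]) -> list[Any]:  # noqa: C901
--     """Convert REPEATED group with multiple children to array of structs.
--
--     For REPEATED groups, each child produces an array per record.  We need
--     to convert from struct-of-arrays to array-of-structs at each record
--     level.
--
--     Input: {
--         'number': [None, [], [5, 6]],
--         'kind': [None, [], ['home', 'work']],
--     }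
--     Output: [
--         None,
--         [],
--         [
--             {'number': 5, 'kind': 'home'},
--             {'number': 6, 'kind': 'work'},
--         ],
--     ]
--     """
--     if not children_data:
--         return []
--
--     # Get number of top-level records from first child
--     first_child = next(iter(children_data.values()))
--     num_records = len(first_child) if isinstance(first_child, list) else 1
--
--     result: list[Any] = []
--     for record_idx in range(num_records):
--         # Get all child arrays for this record
--         all_none = True
--         all_empty = True
--         field_arrays = {}
--
--         for field_name, field_data in children_data.items():
--             value = (
--                 field_data[record_idx]
--                 if isinstance(field_data, list) and record_idx < len(field_data)
--                 else field_data
--             )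
--             field_arrays[field_name] = value
--
--             if value is not None:
--                 all_none = False
--             if value != []:
--                 all_empty = False
--
--         # If all fields are None, the repeated group is null
--         if all_none:
--             result.append(None)
--         # If all fields are empty arrays, the repeated group is empty
--         elif all_empty:
--             result.append([])
--         else:
--             # Zip the field arrays into structs
--             max_len = max(
--                 len(arr) if isinstance(arr, list) else 0
--                 for arr in field_arrays.values()
--             )
--             structs = []
--             for elem_idx in range(max_len):
--                 struct = {}
--                 for field_name, field_array in field_arrays.items():
--                     if isinstance(field_array, list) and elem_idx < len(
--                         field_array,
--                     ):
--                         struct[field_name] = field_array[elem_idx]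
--                     else:
--                         struct[field_name] = None
--                 structs.append(struct)
--             result.append(structs)
--
--     return result
-- ===== SOURCE B (Python) =====
-- def _process_repeated_struct(children_data):
--     """Convert REPEATED group with multiple children to array of structs.
--
--     Column-major build: one pass per field that folds that field's column
--     into every record's partial row list (padding with None-rows as the
--     record grows), instead of indexing rows by position afterwards.
--     """
--     if not children_data:
--         return []
--
--     first_child = next(iter(children_data.values()))
--     num_records = len(first_child) if isinstance(first_child, list) else 1
--
--     # per record: (rows built so far, all_none flag, all_empty flag)
--     states = [([], True, True)] * num_records
--     seen = []
--     for field_name, field_data in children_data.items():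
--         new_states = []
--         for record_idx, (rows, all_none, all_empty) in enumerate(states):
--             value = (
--                 field_data[record_idx]
--                 if isinstance(field_data, list) and record_idx < len(field_data)
--                 else field_data
--             )
--             col = value if isinstance(value, list) else []
--             rows = rows + [
--                 {name: None for name in seen}
--                 for _ in range(len(col) - len(rows))
--             ]
--             for k, row in enumerate(rows):
--                 row[field_name] = col[k] if k < len(col) else None
--             new_states.append((rows, all_none and value is None, all_empty and value == []))
--         states = new_states
--         seen.append(field_name)
--
--     return [
--         None if all_none else ([] if all_empty else rows)
--         for rows, all_none, all_empty in states
--     ]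
-- ===== Notes on version B (the rewrite author's own statement) =====
-- stated objective: alternative
-- what changed: B builds the array-of-structs column-major: one pass per field folds that field's column into every record's growing row list (padding new rows with None for already-seen fields), with per-record all_none/all_empty flags carried in the same state, instead of A's record-major pass that collects field_arrays and then runs a max_len/range index double loop per record.
import Mathlib
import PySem

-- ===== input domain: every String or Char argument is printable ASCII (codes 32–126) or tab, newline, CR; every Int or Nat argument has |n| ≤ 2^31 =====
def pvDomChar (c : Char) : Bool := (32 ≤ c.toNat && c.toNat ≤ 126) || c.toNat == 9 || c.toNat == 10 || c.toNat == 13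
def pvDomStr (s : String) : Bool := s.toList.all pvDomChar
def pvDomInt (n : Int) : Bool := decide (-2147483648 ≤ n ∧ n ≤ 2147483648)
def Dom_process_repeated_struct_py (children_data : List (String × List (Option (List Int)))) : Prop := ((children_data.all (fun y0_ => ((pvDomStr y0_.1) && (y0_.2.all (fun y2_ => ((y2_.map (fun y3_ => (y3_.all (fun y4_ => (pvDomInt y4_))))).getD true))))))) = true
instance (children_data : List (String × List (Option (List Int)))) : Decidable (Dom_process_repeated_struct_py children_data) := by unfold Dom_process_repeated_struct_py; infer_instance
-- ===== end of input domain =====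

-- B builds the result column-major (one pass per field folded into every record's growing row
-- list, flags carried alongside) instead of A's record-major max_len/index double loop; same cost class.

-- ===== PORT A =====
-- Dynamic Python value produced per record by the shared expression
--   field_data[record_idx] if isinstance(field_data, list) and record_idx < len(field_data) else field_data
-- (None, a list of ints, or — out-of-range fallback — the whole column); both Pythons contain it verbatim.
inductive PyV where
  | vnone : PyV
  | arr : List Int → PyV
  | col : List (Option (List Int)) → PyV
deriving DecidableEq, Repr

def pvValue (record_idx : Int) (field_data : List (Option (List Int))) : PyV :=
  if record_idx < PySem.List.len field_data then
    match PySem.List.pyGet? field_data record_idx with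
    | some Option.none => PyV.vnone
    | some (some l) => PyV.arr l
    | Option.none => PyV.col field_data  -- unreachable: record_idx comes from range(num_records), so 0 ≤ record_idx
  else PyV.col field_data

def pvA_isNone : PyV → Bool            -- 'value is None'
  | PyV.vnone => true
  | _ => false

def pvA_eqEmptyList : PyV → Bool       -- 'value == []'
  | PyV.arr [] => true
  | PyV.col [] => true
  | _ => false

def pvA_len : PyV → Nat                -- 'len(arr) if isinstance(arr, list) else 0'
  | PyV.vnone => 0
  | PyV.arr l => l.length
  | PyV.col c => c.length

-- 'field_array[elem_idx] if isinstance(field_array, list) and elem_idx < len(field_array) else None'.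
-- In the col case Python stores an Optional[list] entry; Pre_ makes every entry of a short column None,
-- so 'none' is exact on the claimed inputs.
def pvA_elem (v : PyV) (elem_idx : Int) : Option Int :=
  match v with
  | PyV.arr l => if elem_idx < PySem.List.len l then PySem.List.pyGet? l elem_idx else Option.none
  | PyV.col _ => Option.none
  | PyV.vnone => Option.none

def process_repeated_struct_py (children_data : List (String × List (Option (List Int)))) : List (Option (List (List (String × Option Int)))) :=
  match children_data with
  | [] => []
  | (_, first_child) :: _ =>
    let num_records : Int := PySem.List.len first_child
    (PySem.List.pyRange 0 num_records 1).foldl (fun result record_idx =>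
      -- one pass over the items, maintaining all_none, all_empty and field_arrays exactly as A does
      let st := children_data.foldl
        (fun (acc : Bool × Bool × List (String × PyV)) fd =>
          let value := pvValue record_idx fd.2
          (acc.1 && pvA_isNone value, acc.2.1 && pvA_eqEmptyList value, acc.2.2 ++ [(fd.1, value)]))
        (true, true, [])
      if st.1 then result ++ [Option.none]
      else if st.2.1 then result ++ [some []]
      else
        let field_arrays := st.2.2
        -- Python's max over the (nonempty) generator, written as a fold from 0 (equal on Nat)
        let max_len : Nat := field_arrays.foldl (fun m kv => max m (pvA_len kv.2)) 0
        let structs := (PySem.List.pyRange 0 (max_len : Int) 1).foldl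
          (fun structs elem_idx =>
            structs ++ [field_arrays.foldl (fun struct kv => struct ++ [(kv.1, pvA_elem kv.2 elem_idx)]) []])
          []
        result ++ [some structs]) []

-- ===== PORT B =====
def pvB_isNone : PyV → Bool            -- 'value is None'
  | PyV.vnone => true
  | _ => false

def pvB_eqEmptyList : PyV → Bool       -- 'value == []'
  | PyV.arr [] => true
  | PyV.col [] => true
  | _ => false

-- 'value if isinstance(value, list) else []', with entries as the Optional ints the struct stores.
-- A short column (col case) holds only None entries on the claimed inputs (Pre_), so mapping to none is exact.
def pvB_toColumn : PyV → List (Option Int)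
  | PyV.vnone => []
  | PyV.arr l => l.map some
  | PyV.col c => c.map (fun _ => Option.none)

-- the body of B's inner 'for record_idx, (rows, all_none, all_empty) in enumerate(states)' loop;
-- '{**row, field_name: v}' appends field_name at the end (dict keys are unique, so it is never present)
def pvB_fieldStep (fname : String) (fdata : List (Option (List Int))) (seen : List String)
    (record_idx : Int) (st : List (List (String × Option Int)) × Bool × Bool) :
    List (List (String × Option Int)) × Bool × Bool :=
  let value := pvValue record_idx fdata
  let col := pvB_toColumn value
  let rows := st.1 ++ List.replicate (col.length - st.1.length)
    (seen.map (fun n => (n, (Option.none : Option Int))))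
  let rows := (PySem.List.enumerate rows 0).map (fun p =>
    p.2 ++ [(fname, if p.1 < (col.length : Int) then PySem.List.pyGetD col p.1 Option.none else Option.none)])
  (rows, st.2.1 && pvB_isNone value, st.2.2 && pvB_eqEmptyList value)

def process_repeated_struct_py_alt (children_data : List (String × List (Option (List Int)))) : List (Option (List (List (String × Option Int)))) :=
  match children_data with
  | [] => []
  | (_, first_child) :: _ =>
    let num_records : Int := PySem.List.len first_child
    -- states = [([], True, True)] * num_records; then one pass per field, carrying seen names
    let final := children_data.foldl
      (fun (acc : List (List (List (String × Option Int)) × Bool × Bool) × List String) fd =>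
        ((PySem.List.enumerate acc.1 0).map (fun p => pvB_fieldStep fd.1 fd.2 acc.2 p.1 p.2),
         acc.2 ++ [fd.1]))
      (List.replicate num_records.toNat ([], true, true), [])
    final.1.map (fun st => if st.2.1 then Option.none else if st.2.2 then some [] else some st.1)

-- ===== PRECONDITION & SPEC =====
-- Pre_ excludes inputs where some child column is shorter than the first and contains a non-None entry:
-- there A's fallback pastes the whole Optional[list] column into struct fields, producing values (lists)
-- outside the declared return type dict[str, Optional[int]], which the Lean result type cannot represent.
def Pre_process_repeated_struct_py (children_data : List (String × List (Option (List Int)))) : Prop :=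
  ∀ p ∈ children_data, p.2.length < (children_data.headD ("", [])).2.length → ∀ x ∈ p.2, x = Option.none
instance (children_data : List (String × List (Option (List Int)))) : Decidable (Pre_process_repeated_struct_py children_data) := by unfold Pre_process_repeated_struct_py; infer_instance

def pvWitness_process_repeated_struct_py : (List (String × List (Option (List Int)))) :=
  [("number", [Option.none, some [], some [5, 6]]), ("kind", [Option.none, some [], some [7, 8]])]

def Spec_process_repeated_struct_py (children_data : List (String × List (Option (List Int)))) (out : List (Option (List (List (String × Option Int))))) : Prop := out = process_repeated_struct_py_alt children_data
instance (children_data : List (String × List (Option (List Int)))) (out : List (Option (List (List (String × Option Int))))) : Decidable (Spec_process_repeated_struct_py children_data out) := by unfold Spec_process_repeated_struct_py; infer_instance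

-- ===== CLAIM =====
def Claim_equal_process_repeated_struct_py : Prop := ∀ (children_data : List (String × List (Option (List Int)))), Dom_process_repeated_struct_py children_data → Pre_process_repeated_struct_py children_data → Spec_process_repeated_struct_py children_data (process_repeated_struct_py children_data)

-- ===== LEMMAS AND PROOFS =====

lemma pv_isNone_eq (v : PyV) : pvB_isNone v = pvA_isNone v := by cases v <;> rfl

lemma pv_eqEmptyList_eq (v : PyV) : pvB_eqEmptyList v = pvA_eqEmptyList v := by
  cases v with
  | vnone => rfl
  | arr l => cases l <;> rfl
  | col c => cases c <;> rfl

lemma pv_len_eq_col_length (v : PyV) : pvA_len v = (pvB_toColumn v).length := by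
  cases v <;> simp [pvA_len, pvB_toColumn]

lemma pv_elem_eq_getD (v : PyV) (k : Nat) :
    pvA_elem v (k : Int) = (pvB_toColumn v).getD k Option.none := by
  cases v with
  | vnone => simp [pvA_elem, pvB_toColumn]
  | col c => simp [pvA_elem, pvB_toColumn, List.getD]
  | arr l =>
    simp only [pvA_elem, pvB_toColumn, PySem.List.len_eq, PySem.List.pyGet?_natCast,
      List.getD, List.getElem?_map]
    by_cases h : k < l.length
    · have hc : (k : Int) < (l.length : Int) := by exact_mod_cast h
      rw [if_pos hc, List.getElem?_eq_getElem h]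
      rfl
    · have hc : ¬ (k : Int) < (l.length : Int) := by exact_mod_cast h
      rw [if_neg hc, List.getElem?_eq_none_iff.mpr (by omega)]
      rfl

-- shared index form of one record's struct rows: columns and their max length
def pvCol (i : Int) (fd : String × List (Option (List Int))) : List (Option Int) :=
  pvB_toColumn (pvValue i fd.2)

def pvMaxLen (cols : List (List (Option Int))) : Nat :=
  cols.foldr (fun c m => max c.length m) 0

def pvRows (i : Int) (fs : List (String × List (Option (List Int)))) : List (List (String × Option Int)) :=
  (List.range (pvMaxLen (fs.map (pvCol i)))).map
    (fun k => fs.map (fun fd => (fd.1, (pvCol i fd).getD k Option.none)))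

def pvSt (i : Int) (fs : List (String × List (Option (List Int)))) :
    List (List (String × Option Int)) × Bool × Bool :=
  (pvRows i fs, fs.all (fun fd => pvB_isNone (pvValue i fd.2)),
   fs.all (fun fd => pvB_eqEmptyList (pvValue i fd.2)))

lemma pv_maxLen_le : ∀ (cols : List (List (Option Int))) (c : List (Option Int)), c ∈ cols →
    c.length ≤ pvMaxLen cols := by
  intro cols
  induction cols with
  | nil => intro c h; cases h
  | cons d ds ih =>
    intro c h
    rcases List.mem_cons.mp h with h | h
    · subst h; simp [pvMaxLen]
    · exact le_trans (ih c h) (by simp [pvMaxLen])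

lemma pv_maxLen_append (cols : List (List (Option Int))) (c : List (Option Int)) :
    pvMaxLen (cols ++ [c]) = max (pvMaxLen cols) c.length := by
  induction cols with
  | nil => simp [pvMaxLen]
  | cons d ds ih =>
    simp only [pvMaxLen, List.cons_append, List.foldr_cons] at ih ⊢
    rw [ih]
    exact (Nat.max_assoc _ _ _).symm

-- list(enumerate(l)) when l is a range-indexed map
lemma pv_enumerate_range'_map {σ : Type} (n : Nat) (f : Nat → σ) :
    ∀ (j : Nat), PySem.List.enumerate ((List.range' j n).map f) (j : Int)
      = (List.range' j n).map (fun (k : Nat) => ((k : Int), f k)) := by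
  induction n with
  | zero => intro j; simp [PySem.List.enumerate_nil]
  | succ n ih =>
    intro j
    rw [List.range'_succ]
    simp only [List.map_cons, PySem.List.enumerate_cons]
    have := ih (j + 1)
    rw [show ((j : Int) + 1) = ((j + 1 : Nat) : Int) by push_cast; ring, this]

lemma pv_enumerate_range_map {σ : Type} (n : Nat) (f : Nat → σ) :
    PySem.List.enumerate ((List.range n).map f) 0
      = (List.range n).map (fun (k : Nat) => ((k : Int), f k)) := by
  have := pv_enumerate_range'_map n f 0
  simpa [List.range_eq_range'] using this

-- padding + per-row dict assignment = the index form extended by the new field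
lemma pv_rows_step (fname : String) (fdata : List (Option (List Int))) (i : Int)
    (fs : List (String × List (Option (List Int)))) :
    (PySem.List.enumerate (pvRows i fs ++ List.replicate
        ((pvB_toColumn (pvValue i fdata)).length - (pvRows i fs).length)
        ((fs.map Prod.fst).map (fun n => (n, (Option.none : Option Int))))) 0).map
      (fun p => p.2 ++ [(fname,
        if p.1 < ((pvB_toColumn (pvValue i fdata)).length : Int)
        then PySem.List.pyGetD (pvB_toColumn (pvValue i fdata)) p.1 Option.none else Option.none)])
    = pvRows i (fs ++ [(fname, fdata)]) := by
  set c := pvB_toColumn (pvValue i fdata) with hc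
  have hm : (pvRows i fs).length = pvMaxLen (fs.map (pvCol i)) := by simp [pvRows]
  set m := pvMaxLen (fs.map (pvCol i)) with hmdef
  have hM : pvMaxLen ((fs ++ [(fname, fdata)]).map (pvCol i)) = max m c.length := by
    simp only [List.map_append, List.map_cons, List.map_nil, pv_maxLen_append]
    rfl
  have hpad : pvRows i fs ++ List.replicate (c.length - m)
      ((fs.map Prod.fst).map (fun n => (n, (Option.none : Option Int))))
      = (List.range (max m c.length)).map
          (fun (k : Nat) => fs.map (fun fd => (fd.1, (pvCol i fd).getD k Option.none))) := by
    have hsplit : max m c.length = m + (c.length - m) := by omega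
    rw [hsplit, List.range_add, List.map_append]
    refine congrArg₂ (· ++ ·) ?_ ?_
    · rw [hmdef]; rfl
    · rw [List.map_map]
      symm
      refine List.eq_replicate_iff.mpr ⟨by simp, ?_⟩
      intro b hb
      simp only [List.mem_map, List.mem_range] at hb
      obtain ⟨t, ht, rfl⟩ := hb
      obtain ⟨a, ha, rfl⟩ := ht
      refine List.map_congr_left (fun fd hfd => ?_)
      have hle : (pvCol i fd).length ≤ m := hmdef ▸ pv_maxLen_le _ _ (List.mem_map_of_mem hfd)
      have hnone : (pvCol i fd)[m + a]? = none := List.getElem?_eq_none (by omega)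
      simp [List.getD, hnone]
  rw [hm, hpad, pv_enumerate_range_map, List.map_map]
  unfold pvRows
  rw [hM]
  refine List.map_congr_left (fun k _ => ?_)
  simp only [Function.comp_def, List.map_append, List.map_cons, List.map_nil]
  refine congrArg₂ (· ++ ·) rfl ?_
  refine congrArg (fun v => [(fname, v)]) ?_
  have hcc : pvCol i (fname, fdata) = c := rfl
  rw [hcc]
  by_cases h : k < c.length
  · have hc2 : (k : Int) < (c.length : Int) := by exact_mod_cast h
    rw [if_pos hc2, PySem.List.pyGetD_natCast]
  · have hc2 : ¬ (k : Int) < (c.length : Int) := by exact_mod_cast h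
    rw [if_neg hc2, List.getD_eq_default _ _ (by omega : c.length ≤ k)]

-- one field folded into one record's state
lemma pv_fieldStep_spec (fname : String) (fdata : List (Option (List Int))) (i : Int)
    (fs : List (String × List (Option (List Int)))) :
    pvB_fieldStep fname fdata (fs.map Prod.fst) i (pvSt i fs) = pvSt i (fs ++ [(fname, fdata)]) := by
  unfold pvB_fieldStep pvSt
  dsimp only
  refine congrArg₂ Prod.mk ?_ (congrArg₂ Prod.mk ?_ ?_)
  · exact pv_rows_step fname fdata i fs
  · simp [List.all_append]
  · simp [List.all_append]

-- B's outer field loop: states stay the pointwise pvSt of the processed prefix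
lemma pv_outer_inv (n : Nat) (rest : List (String × List (Option (List Int)))) :
    ∀ (fs : List (String × List (Option (List Int)))),
    rest.foldl
      (fun (acc : List (List (List (String × Option Int)) × Bool × Bool) × List String) fd =>
        ((PySem.List.enumerate acc.1 0).map (fun p => pvB_fieldStep fd.1 fd.2 acc.2 p.1 p.2),
         acc.2 ++ [fd.1]))
      ((List.range n).map (fun (j : Nat) => pvSt (j : Int) fs), fs.map Prod.fst)
    = ((List.range n).map (fun (j : Nat) => pvSt (j : Int) (fs ++ rest)), (fs ++ rest).map Prod.fst) := by
  induction rest with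
  | nil => intro fs; simp
  | cons fd rest ih =>
    intro fs
    rw [List.foldl_cons]
    dsimp only
    rw [pv_enumerate_range_map n (fun (j : Nat) => pvSt (j : Int) fs), List.map_map]
    have hmap : ((List.range n).map ((fun p => pvB_fieldStep fd.1 fd.2 (fs.map Prod.fst) p.1 p.2) ∘
        (fun (k : Nat) => ((k : Int), pvSt (k : Int) fs))))
        = (List.range n).map (fun (j : Nat) => pvSt (j : Int) (fs ++ [fd])) := by
      refine List.map_congr_left (fun k _ => ?_)
      simp only [Function.comp_def]
      exact pv_fieldStep_spec fd.1 fd.2 (k : Int) fs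
    rw [hmap]
    have := ih (fs ++ [fd])
    simpa using this

-- A's single pass accumulating (all_none, all_empty, field_arrays)
lemma pv_fields_foldl (cd : List (String × List (Option (List Int)))) (i : Int) :
    ∀ (b1 b2 : Bool) (acc : List (String × PyV)),
    cd.foldl (fun (acc : Bool × Bool × List (String × PyV)) fd =>
        (acc.1 && pvA_isNone (pvValue i fd.2), acc.2.1 && pvA_eqEmptyList (pvValue i fd.2),
          acc.2.2 ++ [(fd.1, pvValue i fd.2)])) (b1, b2, acc)
      = (b1 && cd.all (fun fd => pvA_isNone (pvValue i fd.2)),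
         b2 && cd.all (fun fd => pvA_eqEmptyList (pvValue i fd.2)),
         acc ++ cd.map (fun fd => (fd.1, pvValue i fd.2))) := by
  induction cd with
  | nil => simp
  | cons fd rest ih =>
    intro b1 b2 acc
    simp only [List.foldl_cons, List.all_cons, List.map_cons, ih, Bool.and_assoc,
      List.append_assoc, List.singleton_append]

lemma pv_maxLen_foldl (fa : List (String × PyV)) :
    ∀ (m : Nat), fa.foldl (fun m kv => max m (pvA_len kv.2)) m
      = max m (pvMaxLen (fa.map (fun kv => pvB_toColumn kv.2))) := by
  induction fa with
  | nil => intro m; simp [pvMaxLen]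
  | cons kv rest ih =>
    intro m
    simp only [List.foldl_cons, List.map_cons]
    rw [ih]
    simp only [pvMaxLen, List.foldr_cons, ← pv_len_eq_col_length]
    exact Nat.max_assoc m (pvA_len kv.2) _

-- the per-record value A appends equals pvSt's classification
lemma pv_record_eq (cd : List (String × List (Option (List Int)))) (i : Int) :
    (let st := cd.foldl
        (fun (acc : Bool × Bool × List (String × PyV)) fd =>
          (acc.1 && pvA_isNone (pvValue i fd.2), acc.2.1 && pvA_eqEmptyList (pvValue i fd.2),
            acc.2.2 ++ [(fd.1, pvValue i fd.2)])) (true, true, [])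
      if st.1 then (Option.none : Option (List (List (String × Option Int))))
      else if st.2.1 then some []
      else
        some ((PySem.List.pyRange 0 ((st.2.2.foldl (fun m kv => max m (pvA_len kv.2)) 0 : Nat) : Int) 1).foldl
          (fun structs elem_idx =>
            structs ++ [st.2.2.foldl (fun struct kv => struct ++ [(kv.1, pvA_elem kv.2 elem_idx)]) []])
          []))
    = (if (pvSt i cd).2.1 then Option.none
       else if (pvSt i cd).2.2 then some []
       else some (pvSt i cd).1) := by
  rw [pv_fields_foldl]
  simp only [pvSt, Bool.true_and, List.nil_append, pv_isNone_eq, pv_eqEmptyList_eq]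
  split_ifs with h1 h2
  · rfl
  · rfl
  · congr 1
    rw [pv_maxLen_foldl]
    simp only [Nat.zero_max, List.map_map, Function.comp_def]
    rw [PySem.List.pyRange_zero_natCast]
    rw [PySem.List.foldl_append_singleton_eq_map (fun elem_idx =>
      (cd.map (fun fd => (fd.1, pvValue i fd.2))).foldl
        (fun struct kv => struct ++ [(kv.1, pvA_elem kv.2 elem_idx)]) [])]
    simp only [List.nil_append, List.map_map, Function.comp_def]
    unfold pvRows
    refine List.map_congr_left (fun k _ => ?_)
    rw [PySem.List.foldl_append_singleton_eq_map
      (fun kv : String × PyV => (kv.1, pvA_elem kv.2 (k : Int)))]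
    simp only [List.nil_append, List.map_map, Function.comp_def]
    exact List.map_congr_left (fun fd _ => by rw [pv_elem_eq_getD]; rfl)

-- ===== VERDICT (by name: the statement is the Claim_ definition above) =====
theorem process_repeated_struct_py_spec : Claim_equal_process_repeated_struct_py := by
  intro cd _ _
  unfold Spec_process_repeated_struct_py
  cases cd with
  | nil => rfl
  | cons hd tl =>
    obtain ⟨k0, first⟩ := hd
    show process_repeated_struct_py ((k0, first) :: tl) = process_repeated_struct_py_alt ((k0, first) :: tl)
    set cd := (k0, first) :: tl with hcd
    set n := first.length with hn
    have hA : process_repeated_struct_py cd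
        = (List.range n).map (fun (j : Nat) =>
            if (pvSt (j : Int) cd).2.1 then Option.none
            else if (pvSt (j : Int) cd).2.2 then some []
            else some (pvSt (j : Int) cd).1) := by
      show (PySem.List.pyRange 0 (PySem.List.len first) 1).foldl _ [] = _
      rw [PySem.List.len_eq, ← hn, PySem.List.pyRange_zero_natCast]
      have main : ∀ (L : List Nat) (init : List (Option (List (List (String × Option Int))))),
          (L.map (fun (k : Nat) => (k : Int))).foldl (fun result record_idx =>
            let st := cd.foldl
              (fun (acc : Bool × Bool × List (String × PyV)) fd =>
                (acc.1 && pvA_isNone (pvValue record_idx fd.2),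
                 acc.2.1 && pvA_eqEmptyList (pvValue record_idx fd.2),
                 acc.2.2 ++ [(fd.1, pvValue record_idx fd.2)])) (true, true, [])
            if st.1 then result ++ [(Option.none : Option (List (List (String × Option Int))))]
            else if st.2.1 then result ++ [some []]
            else
              result ++ [some ((PySem.List.pyRange 0 ((st.2.2.foldl (fun m kv => max m (pvA_len kv.2)) 0 : Nat) : Int) 1).foldl
                (fun structs elem_idx =>
                  structs ++ [st.2.2.foldl (fun struct kv => struct ++ [(kv.1, pvA_elem kv.2 elem_idx)]) []])
                [])]) init
          = init ++ L.map (fun (j : Nat) =>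
              if (pvSt (j : Int) cd).2.1 then Option.none
              else if (pvSt (j : Int) cd).2.2 then some []
              else some (pvSt (j : Int) cd).1) := by
        intro L
        induction L with
        | nil => intro init; simp
        | cons a L ih =>
          intro init
          rw [List.map_cons, List.foldl_cons, List.map_cons, ih]
          have hstep := pv_record_eq cd (a : Int)
          dsimp only at hstep ⊢
          rw [← hstep]
          split_ifs <;> simp
      exact main (List.range n) []
    have hB : process_repeated_struct_py_alt cd
        = (List.range n).map (fun (j : Nat) =>
            if (pvSt (j : Int) cd).2.1 then Option.none
            else if (pvSt (j : Int) cd).2.2 then some []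
            else some (pvSt (j : Int) cd).1) := by
      show (cd.foldl _ (List.replicate (PySem.List.len first).toNat ([], true, true), [])).1.map _ = _
      have hinit : (List.replicate (PySem.List.len first).toNat
          (([] : List (List (String × Option Int))), true, true), ([] : List String))
          = ((List.range n).map (fun (j : Nat) => pvSt (j : Int) ([] : List (String × List (Option (List Int))))),
             ([] : List (String × List (Option (List Int)))).map Prod.fst) := by
        refine congrArg₂ Prod.mk ?_ rfl
        rw [PySem.List.len_eq, Int.toNat_natCast, ← hn]
        refine (List.eq_replicate_iff.mpr ⟨by simp, ?_⟩).symm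
        intro b hb
        simp only [List.mem_map] at hb
        obtain ⟨j, _, rfl⟩ := hb
        simp [pvSt, pvRows, pvMaxLen]
      rw [hinit, pv_outer_inv n cd ([] : List (String × List (Option (List Int))))]
      simp [List.map_map, Function.comp_def]
    rw [hA, hB]
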